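-- pv_equiv track=rewrite | github.com/raadjoe/impact-sameAs-schema-matching | scripts/get-concepts-size-distribution/get-mapped-concepts-distribution.py | splitTermAndID
-- ===== SOURCE A (Python) =====
-- def splitTermAndID(line):
--     parts = line.split(" ")
--     if len(parts) < 2:
--         return parts
--     else:
--         term = ""
--         for i in range(len(parts) - 1):
--             term = term + parts[i]
--         return [term, parts[-1]]
-- ===== SOURCE B (Python) =====
-- def splitTermAndID(line):
--     idx = line.rfind(" ")
--     if idx == -1:
--         return [line]
--     return [line[:idx].replace(" ", ""), line[idx + 1:]]
-- ===== Notes on version B (the rewrite author's own statement) =====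
-- stated objective: idiomatic
-- what changed: Instead of splitting the line into a list of parts and concatenating all but the last in a loop, B locates the last space with rfind and returns the space-stripped prefix and the suffix via slicing and one replace.
import Mathlib
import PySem

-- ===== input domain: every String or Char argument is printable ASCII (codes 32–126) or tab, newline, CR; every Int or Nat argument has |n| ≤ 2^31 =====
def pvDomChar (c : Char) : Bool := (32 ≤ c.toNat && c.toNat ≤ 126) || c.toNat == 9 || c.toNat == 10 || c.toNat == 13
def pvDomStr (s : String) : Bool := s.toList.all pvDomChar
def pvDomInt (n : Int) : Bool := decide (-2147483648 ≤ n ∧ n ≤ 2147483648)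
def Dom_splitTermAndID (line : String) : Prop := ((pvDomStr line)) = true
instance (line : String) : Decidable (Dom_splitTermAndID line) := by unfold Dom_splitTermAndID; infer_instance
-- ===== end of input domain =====

-- B replaces A's split-into-parts-and-concatenate loop by locating the last space with rfind
-- and slicing (idiomatic; same asymptotic cost).

-- ===== PORT A =====
def splitTermAndID (line : String) : List String :=
  match PySem.Str.split? line " " with
  | none => []   -- unreachable: the separator " " is nonempty
  | some parts =>
    if parts.length < 2 then parts
    else
      let term := (PySem.List.pyRange 0 ((parts.length : Int) - 1)).foldl
        (fun t i => t ++ PySem.List.pyGetD parts i "") ""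
      [term, (PySem.List.pyGet? parts (-1)).getD ""]

-- ===== PORT B =====
def splitTermAndID_alt (line : String) : List String :=
  let idx := PySem.Str.rfind line " "
  if idx = -1 then [line]
  else [PySem.Str.replace (PySem.Str.slice line none (some idx)) " " "",
        PySem.Str.slice line (some (idx + 1)) none]

-- ===== PRECONDITION & SPEC =====
def Spec_splitTermAndID (line : String) (out : List String) : Prop := out = splitTermAndID_alt line
instance (line : String) (out : List String) : Decidable (Spec_splitTermAndID line out) := by unfold Spec_splitTermAndID; infer_instance

-- ===== CLAIM (what is proved, stated in full; the proofs are below) =====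
def Claim_equal_splitTermAndID : Prop := ∀ (line : String), Dom_splitTermAndID line → Spec_splitTermAndID line (splitTermAndID line)

-- ===== LEMMAS AND PROOFS =====

/-- Reference single-character split on ' ' (what Python's `split(" ")` computes). -/
def pvSplitSp : List Char → List (List Char)
  | [] => [[]]
  | c :: rest =>
    if c = ' ' then [] :: pvSplitSp rest
    else
      match pvSplitSp rest with
      | [] => [[c]]
      | p :: ps => (c :: p) :: ps

/-- Reference "index of last space, -1 if none" (what Python's `rfind(" ")` computes). -/
def pvLastIdx : List Char → Int
  | [] => -1
  | c :: rest =>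
    if pvLastIdx rest = -1 then (if c = ' ' then 0 else -1) else pvLastIdx rest + 1

theorem pvSplitSp_ne_nil (cs : List Char) : pvSplitSp cs ≠ [] := by
  cases cs with
  | nil => simp [pvSplitSp]
  | cons c rest =>
    simp only [pvSplitSp]
    split_ifs
    · simp
    · cases h : pvSplitSp rest <;> simp

theorem pvSplitSp_cons (cs : List Char) : ∃ p ps, pvSplitSp cs = p :: ps := by
  cases h : pvSplitSp cs with
  | nil => exact absurd h (pvSplitSp_ne_nil cs)
  | cons p ps => exact ⟨p, ps, rfl⟩

theorem splitOn_go_eq (l : List Char) : ∀ (fuel : Nat) (cur : List Char) (accL : List (List Char))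
    (p : List Char) (ps : List (List Char)), l.length ≤ fuel → pvSplitSp l = p :: ps →
    PySem.Chars.splitOn.go [' '] fuel l cur accL = accL.reverse ++ (cur.reverse ++ p) :: ps := by
  induction l with
  | nil =>
    intro fuel cur accL p ps _ hps
    simp [pvSplitSp] at hps
    obtain ⟨rfl, rfl⟩ := hps
    cases fuel <;> simp [PySem.Chars.splitOn.go]
  | cons c rest ih =>
    intro fuel cur accL p ps hfuel hps
    cases fuel with
    | zero => simp at hfuel
    | succ f =>
      rw [PySem.Chars.splitOn.go]
      by_cases hc : c = ' '
      · subst hc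
        rw [if_pos (by simp [List.isPrefixOf])]
        simp only [pvSplitSp] at hps
        obtain ⟨rfl, rfl⟩ : p = [] ∧ ps = pvSplitSp rest := by
          cases hps; exact ⟨rfl, rfl⟩
        obtain ⟨q, qs, hq⟩ := pvSplitSp_cons rest
        rw [show List.drop [' '].length (' ' :: rest) = rest from rfl]
        rw [ih f [] (cur.reverse :: accL) q qs (by simp at hfuel; omega) hq, hq]
        simp
      · have hpre : [' '].isPrefixOf (c :: rest) = false := by
          simp [List.isPrefixOf]; exact fun h => hc h.symm
        rw [if_neg (by simp [hpre])]
        obtain ⟨q, qs, hq⟩ := pvSplitSp_cons rest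
        simp only [pvSplitSp, if_neg hc, hq] at hps
        injection hps with h1 h2
        subst h1; subst h2
        rw [ih f (c :: cur) accL _ _ (by simp at hfuel; omega) hq]
        simp

theorem splitOn_eq (cs : List Char) : PySem.Chars.splitOn cs [' '] = pvSplitSp cs := by
  obtain ⟨p, ps, h⟩ := pvSplitSp_cons cs
  unfold PySem.Chars.splitOn
  rw [splitOn_go_eq cs (cs.length + 1) [] [] p ps (by omega) h, h]
  simp

theorem len_pvSplitSp (cs : List Char) : (pvSplitSp cs).length = cs.count ' ' + 1 := by
  induction cs with
  | nil => simp [pvSplitSp]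
  | cons c rest ih =>
    simp only [pvSplitSp]
    split_ifs with hc
    · subst hc; simp [ih]
    · obtain ⟨p, ps, h⟩ := pvSplitSp_cons rest
      rw [h] at ih
      simp only [h, List.length_cons] at ih ⊢
      rw [List.count_cons]
      simp [hc, ih]

theorem pvSplitSp_no_sp (cs : List Char) (h : ' ' ∉ cs) : pvSplitSp cs = [cs] := by
  induction cs with
  | nil => simp [pvSplitSp]
  | cons c rest ih =>
    simp only [List.mem_cons, not_or] at h
    simp only [pvSplitSp]
    rw [if_neg (fun hc => h.1 hc.symm), ih h.2]

theorem pvLastIdx_ge (cs : List Char) : -1 ≤ pvLastIdx cs := by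
  induction cs with
  | nil => simp [pvLastIdx]
  | cons c rest ih =>
    simp only [pvLastIdx]
    split_ifs <;> omega

theorem pvLastIdx_neg_iff (cs : List Char) : pvLastIdx cs = -1 ↔ ' ' ∉ cs := by
  induction cs with
  | nil => simp [pvLastIdx]
  | cons c rest ih =>
    have := pvLastIdx_ge rest
    simp only [pvLastIdx, List.mem_cons, not_or]
    split_ifs with h hc
    · subst hc; simp
    · constructor
      · intro _; exact ⟨fun he => hc he.symm, ih.mp h⟩
      · intro _; rfl
    · constructor
      · intro hh; omega
      · intro ⟨_, h2⟩; exact absurd (ih.mpr h2) h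

theorem replace_go_eq (l : List Char) : ∀ (fuel : Nat) (acc : List Char), l.length ≤ fuel →
    PySem.Chars.replace.go [' '] [] fuel l acc = acc.reverse ++ l.filter (fun c => c != ' ') := by
  induction l with
  | nil =>
    intro fuel acc _
    cases fuel <;> simp [PySem.Chars.replace.go]
  | cons c rest ih =>
    intro fuel acc hfuel
    cases fuel with
    | zero => simp at hfuel
    | succ f =>
      rw [PySem.Chars.replace.go]
      by_cases hc : c = ' '
      · subst hc
        rw [if_pos (by simp [List.isPrefixOf])]
        rw [show List.drop [' '].length (' ' :: rest) = rest from rfl]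
        rw [ih f _ (by simp at hfuel; omega)]
        simp
      · rw [if_neg (by simp [List.isPrefixOf]; exact fun h => hc h.symm)]
        rw [ih f _ (by simp at hfuel; omega)]
        simp [hc]

theorem replace_sp (cs : List Char) :
    PySem.Chars.replace cs [' '] [] = cs.filter (fun c => c != ' ') := by
  unfold PySem.Chars.replace
  simp only [List.isEmpty_cons]
  rw [if_neg (by simp)]
  rw [replace_go_eq cs cs.length [] (le_refl _)]
  simp

theorem pvLastIdx_take_succ (cs : List Char) : ∀ (n : Nat),
    pvLastIdx (cs.take (n + 1)) =
      if cs[n]? = some ' ' then (n : Int) else pvLastIdx (cs.take n) := by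
  induction cs with
  | nil => intro n; simp
  | cons c rest ih =>
    intro n
    cases n with
    | zero =>
      by_cases hc : c = ' '
      · subst hc; simp [pvLastIdx]
      · simp [pvLastIdx, hc]
    | succ m =>
      simp only [List.take_succ_cons, List.getElem?_cons_succ, pvLastIdx]
      rw [ih m]
      by_cases hm : rest[m]? = some ' '
      · rw [if_pos hm, if_pos hm, if_neg (by omega)]
        push_cast; ring
      · rw [if_neg hm, if_neg hm]

theorem rfind_go_eq (cs : List Char) : ∀ (k : Nat),
    PySem.Chars.rfind.go cs [' '] k = pvLastIdx (cs.take (k + 1)) := by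
  intro k
  induction k with
  | zero =>
    rw [PySem.Chars.rfind.go]
    cases cs with
    | nil => simp [List.isPrefixOf, pvLastIdx]
    | cons c rest =>
      by_cases hc : c = ' '
      · subst hc; simp [List.isPrefixOf, pvLastIdx]
      · have hbeq : (' ' == c) = false := by
          simp only [beq_eq_false_iff_ne, ne_eq]
          exact fun h => hc h.symm
        simp [List.isPrefixOf, hbeq, pvLastIdx, hc]
  | succ j ih =>
    rw [PySem.Chars.rfind.go]
    rw [ih, pvLastIdx_take_succ cs (j + 1)]
    have hpre : [' '].isPrefixOf (List.drop (j + 1) cs) = true ↔ cs[j+1]? = some ' ' := by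
      cases h : List.drop (j + 1) cs with
      | nil =>
        have hnone : cs[j+1]? = none := by rw [← List.head?_drop, h]; rfl
        simp [List.isPrefixOf, hnone]
      | cons d tail =>
        have hd : cs[j+1]? = some d := by rw [← List.head?_drop, h]; rfl
        rw [hd]
        simp [List.isPrefixOf]
        exact eq_comm
    by_cases hsp : cs[j+1]? = some ' '
    · rw [if_pos (hpre.mpr hsp), if_pos hsp]
    · rw [if_neg (by simp only [hpre]; exact hsp), if_neg hsp]

theorem rfind_sp (cs : List Char) : PySem.Chars.rfind cs [' '] = pvLastIdx cs := by
  unfold PySem.Chars.rfind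
  rw [rfind_go_eq cs cs.length, List.take_of_length_le (by omega)]

theorem pvSplitSp_two (cs : List Char) (h : ' ' ∈ cs) :
    ∃ q q2 qs, pvSplitSp cs = q :: q2 :: qs := by
  have hlen := len_pvSplitSp cs
  have hc : 0 < cs.count ' ' := List.count_pos_iff.mpr h
  cases hsp : pvSplitSp cs with
  | nil => exact absurd hsp (pvSplitSp_ne_nil cs)
  | cons q rest =>
    cases rest with
    | nil => rw [hsp] at hlen; simp at hlen; omega
    | cons q2 qs => exact ⟨q, q2, qs, rfl⟩

/-- Main characterisation: all-but-last parts flattened = space-free prefix up to the last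
space, and the last part = suffix after the last space. -/
theorem pvSplitSp_parts (cs : List Char) (h : ' ' ∈ cs) :
    (pvSplitSp cs).dropLast.flatten
        = (cs.take (pvLastIdx cs).toNat).filter (fun c => c != ' ')
    ∧ (pvSplitSp cs).getLast? = some (cs.drop ((pvLastIdx cs).toNat + 1)) := by
  induction cs with
  | nil => simp at h
  | cons c rest ih =>
    by_cases hrest : ' ' ∈ rest
    · obtain ⟨ihA, ihB⟩ := ih hrest
      have hjr : pvLastIdx rest ≠ -1 := fun hh => (pvLastIdx_neg_iff rest).mp hh hrest
      have hge : -1 ≤ pvLastIdx rest := pvLastIdx_ge rest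
      have hlast : pvLastIdx (c :: rest) = pvLastIdx rest + 1 := by
        simp only [pvLastIdx]; rw [if_neg hjr]
      have htn : (pvLastIdx rest + 1).toNat = (pvLastIdx rest).toNat + 1 := by omega
      obtain ⟨q, q2, qs, hq⟩ := pvSplitSp_two rest hrest
      by_cases hc : c = ' '
      · subst hc
        have hsplit : pvSplitSp (' ' :: rest) = [] :: q :: q2 :: qs := by
          simp [pvSplitSp, hq]
        rw [hsplit, hlast, htn]
        constructor
        · have hdl : ([] :: q :: q2 :: qs).dropLast = [] :: (q :: q2 :: qs).dropLast := by
            rw [List.dropLast_cons_of_ne_nil]; simp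
          rw [hdl, List.flatten_cons, List.nil_append]
          rw [hq] at ihA
          rw [ihA, List.take_succ_cons]
          simp
        · rw [List.getLast?_cons_cons]
          rw [hq] at ihB
          rw [List.drop_succ_cons]
          exact ihB
      · have hsplit : pvSplitSp (c :: rest) = (c :: q) :: q2 :: qs := by
          simp only [pvSplitSp, if_neg hc, hq]
        constructor
        · have hdl : ((c :: q) :: q2 :: qs).dropLast = (c :: q) :: (q2 :: qs).dropLast := by
            rw [List.dropLast_cons_of_ne_nil]; simp
          rw [hsplit, hlast, htn, hdl, List.flatten_cons, List.take_succ_cons]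
          rw [hq] at ihA
          have hdl2 : (q :: q2 :: qs).dropLast = q :: (q2 :: qs).dropLast := by
            rw [List.dropLast_cons_of_ne_nil]; simp
          rw [hdl2, List.flatten_cons] at ihA
          simp only [List.filter_cons]
          rw [show (c != ' ') = true by simp [hc]]
          rw [← ihA]
          simp
        · rw [hsplit, hlast, htn, List.getLast?_cons_cons, List.drop_succ_cons]
          rw [hq, List.getLast?_cons_cons] at ihB
          exact ihB
    · have hcs : c = ' ' := by
        rcases List.mem_cons.mp h with h1 | h2
        · exact h1.symm
        · exact absurd h2 hrest
      subst hcs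
      have hjr : pvLastIdx rest = -1 := (pvLastIdx_neg_iff rest).mpr hrest
      have hlast : pvLastIdx (' ' :: rest) = 0 := by
        simp only [pvLastIdx]; rw [if_pos hjr]; simp
      have hsplit : pvSplitSp (' ' :: rest) = [[], rest] := by
        simp [pvSplitSp, pvSplitSp_no_sp rest hrest]
      rw [hlast, hsplit]
      constructor <;> simp

theorem foldl_append_toList (l : List String) : ∀ (init : String),
    (l.foldl (fun t s => t ++ s) init).toList = init.toList ++ (l.map String.toList).flatten := by
  induction l with
  | nil => simp
  | cons s rest ih => intro init; simp [List.foldl_cons, ih, String.toList_append]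

theorem pyGet_neg_one (l : List String) (h : l ≠ []) :
    PySem.List.pyGet? l (-1) = l.getLast? := by
  simp only [PySem.List.pyGet?, PySem.List.pyIdx?]
  have hl : 0 < l.length := List.length_pos_iff.mpr h
  rw [if_neg (by omega), if_pos (by omega)]
  simp only [Option.bind_some]
  rw [List.getLast?_eq_getElem?]
  norm_num

theorem term_loop_eq (parts : List String) (h : parts ≠ []) :
    (PySem.List.pyRange 0 ((parts.length : Int) - 1)).foldl
        (fun t i => t ++ PySem.List.pyGetD parts i "") "" =
      parts.dropLast.foldl (fun t s => t ++ s) "" := by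
  have hl : 0 < parts.length := List.length_pos_iff.mpr h
  have hlen : ((parts.length : Int) - 1) = (parts.dropLast.length : Int) := by
    simp [List.length_dropLast]; omega
  rw [hlen]
  have hcongr : ∀ (t : String), ∀ i ∈ PySem.List.pyRange 0 (parts.dropLast.length : Int),
      t ++ PySem.List.pyGetD parts i "" = t ++ PySem.List.pyGetD parts.dropLast i "" := by
    intro t i hi
    rw [PySem.List.mem_pyRange_one] at hi
    obtain ⟨n, rfl⟩ : ∃ n : Nat, i = (n : Int) := ⟨i.toNat, by omega⟩
    have hn : n < parts.dropLast.length := by exact_mod_cast hi.2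
    rw [PySem.List.pyGetD_natCast, PySem.List.pyGetD_natCast]
    congr 1
    rw [List.getD_eq_getElem?_getD, List.getD_eq_getElem?_getD,
      List.dropLast_eq_take, List.getElem?_take,
      if_pos (by simpa [List.dropLast_eq_take] using hn)]
  rw [PySem.List.foldl_congr_mem _ _ _ _ hcongr]
  have := PySem.List.foldl_pyRange_zero_pyGetD parts.dropLast "" (fun t s => t ++ s) ""
  simp only [PySem.List.len] at this
  exact this

-- ===== VERDICT (by name: the statement is the Claim_ definition above) =====
set_option maxHeartbeats 2000000 in
theorem splitTermAndID_spec : Claim_equal_splitTermAndID := by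
  intro line _
  unfold Spec_splitTermAndID splitTermAndID splitTermAndID_alt
  have hsep : (" " : String).toList = [' '] := rfl
  have hsplit : PySem.Str.split? line " " = some ((pvSplitSp line.toList).map String.ofList) := by
    unfold PySem.Str.split? PySem.Chars.split?
    rw [hsep]
    rw [if_neg (by simp)]
    rw [splitOn_eq]
    rfl
  have hrf : PySem.Str.rfind line " " = pvLastIdx line.toList := by
    rw [PySem.Str.rfind_eq, hsep, rfind_sp]
  simp only [hsplit, hrf]
  by_cases h : ' ' ∈ line.toList
  · have hjne : pvLastIdx line.toList ≠ -1 := fun hh => (pvLastIdx_neg_iff line.toList).mp hh h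
    have hge : -1 ≤ pvLastIdx line.toList := pvLastIdx_ge line.toList
    have hj0 : 0 ≤ pvLastIdx line.toList := by omega
    obtain ⟨q, q2, qs, hq⟩ := pvSplitSp_two line.toList h
    have hlen2 : ¬ ((pvSplitSp line.toList).map String.ofList).length < 2 := by
      rw [hq]; simp
    rw [if_neg hlen2, if_neg hjne]
    obtain ⟨hA, hB⟩ := pvSplitSp_parts line.toList h
    have hne : (pvSplitSp line.toList).map String.ofList ≠ [] := by rw [hq]; simp
    congr 1
    · -- first component
      have htn' : (pvLastIdx line.toList + 1).toNat = (pvLastIdx line.toList).toNat + 1 := by omega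
      rw [term_loop_eq _ hne, ← String.toList_inj, foldl_append_toList,
        PySem.Str.toList_replace, PySem.Str.toList_slice, hsep]
      rw [show ("" : String).toList = [] from rfl]
      rw [PySem.Chars.slice_eq_listSlice, PySem.List.slice_to _ hj0, replace_sp]
      rw [← hA]
      simp [List.map_dropLast, List.map_map, Function.comp_def, String.toList_ofList]
    · -- second component
      congr 1
      rw [pyGet_neg_one _ hne, List.getLast?_map, hB]
      simp only [Option.map_some, Option.getD_some]
      rw [← String.toList_inj, PySem.Str.toList_slice, PySem.Chars.slice_eq_listSlice,
        PySem.List.slice_from _ (by omega : (0:Int) ≤ pvLastIdx line.toList + 1)]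
      have htn : (pvLastIdx line.toList + 1).toNat = (pvLastIdx line.toList).toNat + 1 := by omega
      rw [htn]
      simp [String.toList_ofList]
  · have hj : pvLastIdx line.toList = -1 := (pvLastIdx_neg_iff line.toList).mpr h
    rw [if_pos hj]
    rw [pvSplitSp_no_sp line.toList h]
    rw [if_pos (by simp)]
    simp [String.ofList_toList]
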